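-- pv_equiv track=rewrite | github.com/Potato2357/autoglosser | autoglosser.py | get_sublists
-- ===== SOURCE A (Python) =====
-- from itertools import combinations
--
-- def get_sublists(lst):
--     lst.reverse()
--     res = [list(combinations(lst, r)) for r in range(1, len(lst) + 1)]
--     res = [list(sublist) for g in res for sublist in g]
--     ans = []
--     for x in res:
--         sbl2str = ""
--         for k in x:
--             sbl2str = k + "." + sbl2str
--         ans.append(sbl2str[:-1])
--     ans.reverse()
--     lst.reverse()
--     return ans
-- ===== SOURCE B (Python) =====
-- def get_sublists(lst):
--     # Recursive colex-order index-set generation; sizes descending; join once per subset.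
--     def colex(m, k):
--         if k == 0:
--             return [[]]
--         if m == 0:
--             return []
--         return colex(m - 1, k) + [c + [m - 1] for c in colex(m - 1, k - 1)]
--     n = len(lst)
--     ans = []
--     for r in range(n, 0, -1):
--         for idx in colex(n, r):
--             ans.append(".".join(lst[i] for i in idx))
--     return ans
-- ===== Notes on version B (the rewrite author's own statement) =====
-- stated objective: alternative
-- what changed: Replaces itertools.combinations on a reversed copy plus per-subset prepend string building and two whole-list reversals with a direct recursive generator of colex-ordered index sets, a single descending size loop and one join per subset.
import Mathlib
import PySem

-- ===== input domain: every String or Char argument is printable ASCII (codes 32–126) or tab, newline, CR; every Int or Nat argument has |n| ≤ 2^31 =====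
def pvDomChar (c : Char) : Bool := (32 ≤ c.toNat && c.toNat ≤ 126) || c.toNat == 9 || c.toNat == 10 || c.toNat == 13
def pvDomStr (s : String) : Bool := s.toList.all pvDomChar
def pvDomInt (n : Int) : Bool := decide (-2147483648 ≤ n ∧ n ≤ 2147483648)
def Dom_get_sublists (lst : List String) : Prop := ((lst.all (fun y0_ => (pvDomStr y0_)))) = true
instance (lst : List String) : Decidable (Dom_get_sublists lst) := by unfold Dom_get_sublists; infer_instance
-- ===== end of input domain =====

-- B replaces itertools.combinations on a reversed copy + prepend string building + two reversals by a
-- recursive colex-order index-set generator with a descending size loop and one join per subset (same cost,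
-- different algorithm). A's in-place reverse of `lst` is undone before returning, so equality of RETURN values
-- is the whole behaviour on List String inputs.

-- ===== PORT A =====
-- A builds the joined string by repeated `k + "." + sbl2str`; ported over List Char (Python str concat is
-- exact concatenation of code points) with the final `[:-1]` as PySem.List.slice.
def get_sublists (lst : List String) : List String :=
  let l1 := lst.reverse
  let res := (List.range l1.length).flatMap (fun i => PySem.List.combinations l1 (i + 1))
  let ans := res.foldl (fun ans x =>
      let sbl2str := x.foldl (fun acc k => k.toList ++ '.' :: acc) ([] : List Char)
      ans ++ [String.ofList (PySem.List.slice sbl2str none (some (-1)))]) ([] : List String)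
  ans.reverse

-- ===== PORT B =====
-- hand-written recursive generator from Source B: size-k subsets of {0,…,m-1} in colex order
def colexIdx : Nat → Nat → List (List Nat)
  | _, 0 => [[]]
  | 0, _ + 1 => []
  | m + 1, k + 1 => colexIdx m (k + 1) ++ (colexIdx m k).map (fun c => c ++ [m])

def get_sublists_alt (lst : List String) : List String :=
  let n := lst.length
  (List.range n).reverse.flatMap (fun i =>
    (colexIdx n (i + 1)).map (fun idx => PySem.Str.join "." (idx.map (fun j => lst.getD j ""))))

-- ===== PRECONDITION & SPEC =====
def Spec_get_sublists (lst : List String) (out : List String) : Prop := out = get_sublists_alt lst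
instance (lst : List String) (out : List String) : Decidable (Spec_get_sublists lst out) := by unfold Spec_get_sublists; infer_instance

-- ===== CLAIM (what is proved, stated in full; the proofs are below) =====
def Claim_equal_get_sublists : Prop := ∀ (lst : List String), Dom_get_sublists lst → Spec_get_sublists lst (get_sublists lst)

-- ===== LEMMAS AND PROOFS =====

-- A's prepend loop materialised: it lays out the reversed words each followed by a dot.
theorem foldl_prepend_eq (x : List String) (acc : List Char) :
    x.foldl (fun acc k => k.toList ++ '.' :: acc) acc
      = x.reverse.flatMap (fun k => k.toList ++ ['.']) ++ acc := by
  induction x generalizing acc with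
  | nil => simp
  | cons k t ih => simp [List.foldl_cons, ih]

-- dropping the trailing dot turns that layout into a '.'-join
theorem dropLast_flatMap_dot (ys : List String) :
    (ys.flatMap (fun k => k.toList ++ ['.'])).dropLast
      = PySem.Chars.join ['.'] (ys.map String.toList) := by
  induction ys with
  | nil => simp [PySem.Chars.join_nil]
  | cons a t ih =>
    cases t with
    | nil => simp [PySem.Chars.join_singleton]
    | cons b u =>
      rw [List.map_cons, List.map_cons, PySem.Chars.join_cons_cons, ← List.map_cons, ← ih]
      have hne : (b :: u).flatMap (fun k => k.toList ++ ['.']) ≠ [] := by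
        simp [List.flatMap]
      simp only [List.flatMap_cons] at hne ⊢
      rw [List.dropLast_append_of_ne_nil hne]

-- A's per-subset string = '.'-join of the reversed subset
theorem fA_eq_join (x : List String) :
    String.ofList (PySem.List.slice
        (x.foldl (fun acc k => k.toList ++ '.' :: acc) ([] : List Char)) none (some (-1)))
      = PySem.Str.join "." x.reverse := by
  apply String.toList_inj.mp
  rw [PySem.Str.toList_join, PySem.List.slice_to_neg_one, foldl_prepend_eq]
  rw [List.append_nil, dropLast_flatMap_dot, String.toList_ofList,
      show ("." : String).toList = ['.'] from rfl]

theorem colexIdx_lt (m k : Nat) (idx : List Nat) (h : idx ∈ colexIdx m k) :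
    ∀ j ∈ idx, j < m := by
  induction m generalizing k idx with
  | zero =>
    cases k with
    | zero => simp [colexIdx] at h; simp [h]
    | succ k => simp [colexIdx] at h
  | succ m ih =>
    cases k with
    | zero => simp [colexIdx] at h; simp [h]
    | succ k =>
      simp only [colexIdx, List.mem_append, List.mem_map] at h
      rcases h with h | ⟨c, hc, rfl⟩
      · exact fun j hj => Nat.lt_succ_of_lt (ih (k + 1) idx h j hj)
      · intro j hj
        rcases List.mem_append.mp hj with hj | hj
        · exact Nat.lt_succ_of_lt (ih k c hc j hj)
        · simp at hj; omega

-- core identity: A's reverse-of-reversed-combinations block is B's colex index block, read through lst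
theorem comb_rev_eq_colex (ys : List String) (r : Nat) :
    ((PySem.List.combinations ys r).map List.reverse).reverse
      = (colexIdx ys.length r).map (fun idx => idx.map (fun j => ys.reverse.getD j "")) := by
  induction ys generalizing r with
  | nil =>
    cases r with
    | zero => simp [PySem.List.combinations_zero, colexIdx]
    | succ r => simp [PySem.List.combinations_nil_succ, colexIdx]
  | cons a t ih =>
    cases r with
    | zero => simp [PySem.List.combinations_zero, colexIdx]
    | succ r =>
      rw [PySem.List.combinations_cons_succ]
      have hlen : (a :: t).length = t.length + 1 := rfl
      rw [hlen]
      show (((PySem.List.combinations t r).map (fun c => a :: c)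
              ++ PySem.List.combinations t (r + 1)).map List.reverse).reverse
          = (colexIdx (t.length + 1) (r + 1)).map
              (fun idx => idx.map (fun j => (a :: t).reverse.getD j ""))
      simp only [List.reverse_cons]
      rw [show colexIdx (t.length + 1) (r + 1)
            = colexIdx t.length (r + 1) ++ (colexIdx t.length r).map (fun c => c ++ [t.length]) from rfl]
      rw [List.map_append, List.reverse_append, List.map_append]
      congr 1
      · rw [ih (r + 1)]
        apply List.map_congr_left
        intro idx hidx
        apply List.map_congr_left
        intro j hj
        have hjlt : j < t.length := colexIdx_lt t.length (r + 1) idx hidx j hj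
        exact (List.getD_append t.reverse [a] "" j (by simpa using hjlt)).symm
      · rw [List.map_map, List.map_map]
        have h1 : ((PySem.List.combinations t r).map
              (List.reverse ∘ fun c => a :: c)).reverse
            = (((PySem.List.combinations t r).map List.reverse).reverse).map (fun c => c ++ [a]) := by
          simp only [← List.map_reverse, List.map_map]
          apply List.map_congr_left
          intro c _
          simp
        rw [h1, ih r]
        simp only [List.map_map]
        apply List.map_congr_left
        intro idx hidx
        simp only [Function.comp_apply]
        show (idx.map (fun j => t.reverse.getD j "")) ++ [a]
            = (idx ++ [t.length]).map (fun j => (t.reverse ++ [a]).getD j "")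
        rw [List.map_append]
        congr 1
        · apply List.map_congr_left
          intro j hj
          have hjlt : j < t.length := colexIdx_lt t.length r idx hidx j hj
          exact (List.getD_append t.reverse [a] "" j (by simpa using hjlt)).symm
        · have : t.reverse.length = t.length := List.length_reverse
          simp [List.getD, this]

theorem reverse_flatMap' {α β : Type} (l : List α) (f : α → List β) :
    (l.flatMap f).reverse = l.reverse.flatMap (fun x => (f x).reverse) := by
  simp [List.flatMap, List.reverse_flatten, List.map_reverse]
  rfl

-- per-size block: A's mapped/reversed combinations block equals B's colex block
theorem block_eq (lst : List String) (r : Nat) :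
    ((PySem.List.combinations lst.reverse r).map (fun x =>
        String.ofList (PySem.List.slice
          (x.foldl (fun acc k => k.toList ++ '.' :: acc) ([] : List Char)) none (some (-1))))).reverse
      = (colexIdx lst.length r).map
          (fun idx => PySem.Str.join "." (idx.map (fun j => lst.getD j ""))) := by
  rw [List.map_congr_left (fun x _ => fA_eq_join x)]
  have h1 : (PySem.List.combinations lst.reverse r).map
        (fun x => PySem.Str.join "." x.reverse)
      = ((PySem.List.combinations lst.reverse r).map List.reverse).map (PySem.Str.join ".") := by
    rw [List.map_map]; rfl
  rw [h1, ← List.map_reverse, comb_rev_eq_colex, List.map_map]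
  simp only [List.reverse_reverse, List.length_reverse]
  rfl

-- ===== VERDICT (by name: the statement is the Claim_ definition above) =====
theorem get_sublists_spec : Claim_equal_get_sublists := by
  intro lst _
  show get_sublists lst = get_sublists_alt lst
  unfold get_sublists get_sublists_alt
  simp only [List.length_reverse]
  rw [PySem.List.foldl_append_singleton_eq_map, List.nil_append, List.map_flatMap,
      reverse_flatMap']
  apply List.flatMap_congr
  intro i _
  exact block_eq lst (i + 1)
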